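-- pv_equiv track=rewrite | github.com/can-gurkan/gridarians | utils.py | check_actions
-- ===== SOURCE A (Python) =====
-- def get_allowed_actions(configuration):
--     action_counts = {"N_UP": 0, "N_RIGHT": 0, "N_DOWN": 0, "N_LEFT": 0, "N_CW": 0, "N_CCW": 0}
--     for part in configuration:
--         if part[2] == 2:
--             if part[3] == 0:
--                 action_counts["N_UP"] += 1
--             elif part[3] == 1:
--                 action_counts["N_DOWN"] += 1
--             elif part[3] == 2:
--                 action_counts["N_LEFT"] += 1
--             elif part[3] == 3:
--                 action_counts["N_RIGHT"] += 1
--         elif part[2] == 3: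
--             if part[3] == 0:
--                 action_counts["N_CW"] += 1
--             elif part[3] == 1:
--                 action_counts["N_CCW"] += 1
--     return action_counts
--
-- def check_actions(configuration, actions):
--     action_counts = get_allowed_actions(configuration)
--     # Map action strings to count keys
--     action_mapping = {
--         "up": "N_UP", "right": "N_RIGHT", "down": "N_DOWN",
--         "left": "N_LEFT", "cw": "N_CW", "ccw": "N_CCW"
--     }
--     # Count occurrences of each action in the actions list
--     action_list_counts = {key: 0 for key in action_counts.keys()}
--     for action in actions:
--         if action in action_mapping:
--             action_list_counts[action_mapping[action]] += 1
--     # Check if all action requirements are satisfied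
--     return all(action_counts[key] >= action_list_counts[key] for key in action_counts)
-- ===== SOURCE B (Python) =====
-- CODE = {"up": 0, "down": 1, "left": 2, "right": 3, "cw": 4, "ccw": 5}
-- SLOT = {(2, 0): 0, (2, 1): 1, (2, 2): 2, (2, 3): 3, (3, 0): 4, (3, 1): 5}
--
-- def _covered(wants, grants):
--     # both lists sorted: two-pointer merge deciding sub-multiset containment
--     i = j = 0
--     while j < len(wants):
--         if i == len(grants):
--             return False
--         g, w = grants[i], wants[j]
--         if g < w:
--             i += 1
--         elif g == w:
--             i += 1
--             j += 1
--         else: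
--             return False
--     return True
--
-- def check_actions(configuration, actions):
--     grants = sorted(SLOT[(p[2], p[3])] for p in configuration
--                     if p[2] in (2, 3) and (p[2], p[3]) in SLOT)
--     wants = sorted(CODE[a] for a in actions if a in CODE)
--     return _covered(wants, grants)
-- ===== Notes on version B (the rewrite author's own statement) =====
-- stated objective: alternative
-- what changed: Instead of tallying per-key counters and comparing all six keys, B encodes each granted slot and each requested action as a small integer, sorts both code lists, and decides sub-multiset containment with a two-pointer merge scan.
import Mathlib
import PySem

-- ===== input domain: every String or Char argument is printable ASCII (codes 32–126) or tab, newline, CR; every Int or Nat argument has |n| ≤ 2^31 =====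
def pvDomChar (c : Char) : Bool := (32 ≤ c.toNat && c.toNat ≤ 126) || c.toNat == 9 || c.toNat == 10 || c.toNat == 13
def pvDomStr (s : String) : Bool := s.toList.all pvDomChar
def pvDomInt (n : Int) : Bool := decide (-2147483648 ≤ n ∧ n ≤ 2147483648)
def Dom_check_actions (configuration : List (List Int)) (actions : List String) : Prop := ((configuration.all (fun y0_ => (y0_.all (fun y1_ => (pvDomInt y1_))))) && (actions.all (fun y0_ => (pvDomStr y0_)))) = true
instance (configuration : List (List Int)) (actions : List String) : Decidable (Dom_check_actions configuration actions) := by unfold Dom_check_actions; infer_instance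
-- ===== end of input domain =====

-- B replaces A's per-key tally-and-compare by a different algorithm: encode grants and
-- requests as small integer codes, sort both code lists, and decide sub-multiset
-- containment with a two-pointer merge scan (objective: alternative).

-- ===== PORT A =====
-- list indexing part[2]/part[3] is ported as pyGetD, exact under Pre_check_actions (indices in range);
-- dict `+= 1` on an always-present key is Dict.modify with default 0 (exact: the key is present).
def pvGetAllowedActions (configuration : List (List Int)) : PySem.Dict String Int :=
  configuration.foldl (fun d part =>
    if PySem.List.pyGetD part 2 0 = 2 then
      if PySem.List.pyGetD part 3 0 = 0 then d.modify "N_UP" 0 (· + 1)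
      else if PySem.List.pyGetD part 3 0 = 1 then d.modify "N_DOWN" 0 (· + 1)
      else if PySem.List.pyGetD part 3 0 = 2 then d.modify "N_LEFT" 0 (· + 1)
      else if PySem.List.pyGetD part 3 0 = 3 then d.modify "N_RIGHT" 0 (· + 1)
      else d
    else if PySem.List.pyGetD part 2 0 = 3 then
      if PySem.List.pyGetD part 3 0 = 0 then d.modify "N_CW" 0 (· + 1)
      else if PySem.List.pyGetD part 3 0 = 1 then d.modify "N_CCW" 0 (· + 1)
      else d
    else d)
    (PySem.Dict.ofList [("N_UP", 0), ("N_RIGHT", 0), ("N_DOWN", 0), ("N_LEFT", 0), ("N_CW", 0), ("N_CCW", 0)])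

def pvActionMapping : PySem.Dict String String :=
  PySem.Dict.ofList [("up", "N_UP"), ("right", "N_RIGHT"), ("down", "N_DOWN"),
                     ("left", "N_LEFT"), ("cw", "N_CW"), ("ccw", "N_CCW")]

def check_actions (configuration : List (List Int)) (actions : List String) : Bool :=
  let action_counts := pvGetAllowedActions configuration
  let alc0 := action_counts.keys.foldl (fun d k => d.insert k (0 : Int)) PySem.Dict.empty
  let action_list_counts := actions.foldl (fun d action =>
    if pvActionMapping.contains action then
      d.modify ((pvActionMapping.get? action).getD "") 0 (· + 1)
    else d) alc0
  action_counts.keys.all (fun key =>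
    decide (action_counts.getD key 0 ≥ action_list_counts.getD key 0))

-- ===== PORT B =====
def pvCODE : PySem.Dict String Int :=
  PySem.Dict.ofList [("up", 0), ("down", 1), ("left", 2), ("right", 3), ("cw", 4), ("ccw", 5)]

def pvSLOT : PySem.Dict (Int × Int) Int :=
  PySem.Dict.ofList [((2, 0), 0), ((2, 1), 1), ((2, 2), 2), ((2, 3), 3), ((3, 0), 4), ((3, 1), 5)]

-- Source B's _covered two-pointer while loop: recursion on the two suffixes (i, j = dropped prefixes)
def pvCovered : List Int → List Int → Bool
  | [], _ => true
  | _ :: _, [] => false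
  | w :: ws, g :: gs =>
    if g < w then pvCovered (w :: ws) gs
    else if g = w then pvCovered ws gs
    else false
termination_by ws gs => ws.length + gs.length

def check_actions_alt (configuration : List (List Int)) (actions : List String) : Bool :=
  let grants := PySem.List.sorted (configuration.filterMap (fun p =>
    if (PySem.List.pyGetD p 2 0 = 2 ∨ PySem.List.pyGetD p 2 0 = 3)
        ∧ pvSLOT.contains (PySem.List.pyGetD p 2 0, PySem.List.pyGetD p 3 0)
    then pvSLOT.get? (PySem.List.pyGetD p 2 0, PySem.List.pyGetD p 3 0) else none))
    (fun x => x) false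
  let wants := PySem.List.sorted (actions.filterMap (fun a =>
    if pvCODE.contains a then pvCODE.get? a else none)) (fun x => x) false
  pvCovered wants grants

-- ===== PRECONDITION & SPEC =====
-- Pre_ excludes exactly the inputs where Python A raises IndexError: a part shorter than 3,
-- or a part with part[2] in {2,3} shorter than 4 (part[3] is then accessed).
def Pre_check_actions (configuration : List (List Int)) (actions : List String) : Prop :=
  ∀ p ∈ configuration, 3 ≤ p.length ∧ ((p.getD 2 0 = 2 ∨ p.getD 2 0 = 3) → 4 ≤ p.length)
instance (configuration : List (List Int)) (actions : List String) : Decidable (Pre_check_actions configuration actions) := by unfold Pre_check_actions; infer_instance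

def pvWitness_check_actions : List (List Int) × List String := ([[0, 0, 2, 0]], ["up"])

def Spec_check_actions (configuration : List (List Int)) (actions : List String) (out : Bool) : Prop := out = check_actions_alt configuration actions
instance (configuration : List (List Int)) (actions : List String) (out : Bool) : Decidable (Spec_check_actions configuration actions out) := by unfold Spec_check_actions; infer_instance

-- ===== CLAIM (what is proved, stated in full; the proofs are below) =====
def Claim_equal_check_actions : Prop := ∀ (configuration : List (List Int)) (actions : List String), Dom_check_actions configuration actions → Pre_check_actions configuration actions → Spec_check_actions configuration actions (check_actions configuration actions)

-- ===== LEMMAS AND PROOFS =====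

-- closed form of A's part -> counter-key dispatch (a = part[2], b = part[3])
def pvKeyA (a b : Int) : Option String :=
  if a = 2 then
    if b = 0 then some "N_UP" else if b = 1 then some "N_DOWN"
    else if b = 2 then some "N_LEFT" else if b = 3 then some "N_RIGHT" else none
  else if a = 3 then
    if b = 0 then some "N_CW" else if b = 1 then some "N_CCW" else none
  else none

-- closed form of A's action -> counter-key dispatch
def pvKeyAct (s : String) : Option String :=
  if pvActionMapping.contains s then some ((pvActionMapping.get? s).getD "") else none

-- closed forms of B's two encoders
def pvKeyG (a b : Int) : Option Int :=
  if (a = 2 ∨ a = 3) ∧ pvSLOT.contains (a, b) then pvSLOT.get? (a, b) else none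

def pvKeyW (s : String) : Option Int :=
  if pvCODE.contains s then pvCODE.get? s else none

-- generic: getD after a "modify the dispatched key by +1" loop
theorem pv_getD_foldl_modifyOpt {α : Type} (key? : α → Option String) (l : List α)
    (d : PySem.Dict String Int) (v : String) :
    (l.foldl (fun d x => match key? x with | some k => d.modify k 0 (· + 1) | none => d) d).getD v 0
      = d.getD v 0 + (l.countP (fun x => key? x == some v) : Int) := by
  induction l generalizing d with
  | nil => simp
  | cons x xs ih =>
    simp only [List.foldl_cons, List.countP_cons]
    cases h : key? x with
    | none => simp [ih]
    | some k =>
      rw [ih, PySem.Dict.getD_modify]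
      by_cases hv : v = k
      · subst hv; simp; ring
      · simp [hv, Ne.symm hv]

-- generic: such a loop whose dispatched keys are already present leaves the key list unchanged
theorem pv_keys_foldl_modifyOpt {α : Type} (key? : α → Option String) (l : List α)
    (d : PySem.Dict String Int) (h : ∀ x ∈ l, ∀ k, key? x = some k → k ∈ d.keys) :
    (l.foldl (fun d x => match key? x with | some k => d.modify k 0 (· + 1) | none => d) d).keys
      = d.keys := by
  induction l generalizing d with
  | nil => rfl
  | cons x xs ih =>
    simp only [List.foldl_cons]
    cases hk : key? x with
    | none => exact ih d (fun y hy => h y (List.mem_cons_of_mem _ hy))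
    | some k =>
      have hmem : k ∈ d.keys := h x List.mem_cons_self k hk
      have hkeys : (d.modify k 0 (· + 1)).keys = d.keys := by
        rw [PySem.Dict.keys_modify, PySem.Dict.keys_insert_of_contains]
        exact (PySem.Dict.contains_iff_mem_keys d k).mpr hmem
      rw [ih _ (fun y hy k' hk' => by rw [hkeys]; exact h y (List.mem_cons_of_mem _ hy) k' hk'), hkeys]

theorem pv_stepA_eq (d : PySem.Dict String Int) (part : List Int) :
    (if PySem.List.pyGetD part 2 0 = 2 then
      if PySem.List.pyGetD part 3 0 = 0 then d.modify "N_UP" 0 (· + 1)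
      else if PySem.List.pyGetD part 3 0 = 1 then d.modify "N_DOWN" 0 (· + 1)
      else if PySem.List.pyGetD part 3 0 = 2 then d.modify "N_LEFT" 0 (· + 1)
      else if PySem.List.pyGetD part 3 0 = 3 then d.modify "N_RIGHT" 0 (· + 1)
      else d
    else if PySem.List.pyGetD part 2 0 = 3 then
      if PySem.List.pyGetD part 3 0 = 0 then d.modify "N_CW" 0 (· + 1)
      else if PySem.List.pyGetD part 3 0 = 1 then d.modify "N_CCW" 0 (· + 1)
      else d
    else d)
    = match pvKeyA (PySem.List.pyGetD part 2 0) (PySem.List.pyGetD part 3 0) with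
      | some k => d.modify k 0 (· + 1) | none => d := by
  unfold pvKeyA; split_ifs <;> rfl

theorem pv_stepAct_eq (d : PySem.Dict String Int) (action : String) :
    (if pvActionMapping.contains action then
      d.modify ((pvActionMapping.get? action).getD "") 0 (· + 1)
    else d)
    = match pvKeyAct action with
      | some k => d.modify k 0 (· + 1) | none => d := by
  unfold pvKeyAct; split_ifs <;> rfl

theorem pv_mapGet_eq (s : String) :
    pvActionMapping.get? s =
      (if s = "up" then some "N_UP" else if s = "right" then some "N_RIGHT"
       else if s = "down" then some "N_DOWN" else if s = "left" then some "N_LEFT"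
       else if s = "cw" then some "N_CW" else if s = "ccw" then some "N_CCW" else none) := by
  have h : pvActionMapping = { items := [("up", "N_UP"), ("right", "N_RIGHT"), ("down", "N_DOWN"),
                                         ("left", "N_LEFT"), ("cw", "N_CW"), ("ccw", "N_CCW")] } := by decide
  rw [h]
  rcases eq_or_ne s "up" with rfl | h1; · decide
  rcases eq_or_ne s "right" with rfl | h2; · decide
  rcases eq_or_ne s "down" with rfl | h3; · decide
  rcases eq_or_ne s "left" with rfl | h4; · decide
  rcases eq_or_ne s "cw" with rfl | h5; · decide
  rcases eq_or_ne s "ccw" with rfl | h6; · decide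
  simp [h1, h2, h3, h4, h5, h6, Ne.symm h1, Ne.symm h2, Ne.symm h3, Ne.symm h4,
        Ne.symm h5, Ne.symm h6, PySem.Dict.get?]

theorem pv_keyAct_eq (s : String) :
    pvKeyAct s =
      (if s = "up" then some "N_UP" else if s = "right" then some "N_RIGHT"
       else if s = "down" then some "N_DOWN" else if s = "left" then some "N_LEFT"
       else if s = "cw" then some "N_CW" else if s = "ccw" then some "N_CCW" else none) := by
  unfold pvKeyAct
  rw [PySem.Dict.contains_eq_isSome_get?, pv_mapGet_eq]
  rcases eq_or_ne s "up" with rfl | h1; · decide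
  rcases eq_or_ne s "right" with rfl | h2; · decide
  rcases eq_or_ne s "down" with rfl | h3; · decide
  rcases eq_or_ne s "left" with rfl | h4; · decide
  rcases eq_or_ne s "cw" with rfl | h5; · decide
  rcases eq_or_ne s "ccw" with rfl | h6; · decide
  simp [h1, h2, h3, h4, h5, h6]

theorem pv_keyW_eq (s : String) :
    pvKeyW s =
      (if s = "up" then some 0 else if s = "down" then some 1
       else if s = "left" then some 2 else if s = "right" then some 3
       else if s = "cw" then some 4 else if s = "ccw" then some 5 else none) := by
  unfold pvKeyW
  have h : pvCODE = { items := [("up", (0:Int)), ("down", 1), ("left", 2), ("right", 3), ("cw", 4), ("ccw", 5)] } := by decide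
  rw [PySem.Dict.contains_eq_isSome_get?, h]
  rcases eq_or_ne s "up" with rfl | h1; · decide
  rcases eq_or_ne s "down" with rfl | h2; · decide
  rcases eq_or_ne s "left" with rfl | h3; · decide
  rcases eq_or_ne s "right" with rfl | h4; · decide
  rcases eq_or_ne s "cw" with rfl | h5; · decide
  rcases eq_or_ne s "ccw" with rfl | h6; · decide
  simp [h1, h2, h3, h4, h5, h6, Ne.symm h1, Ne.symm h2, Ne.symm h3, Ne.symm h4,
        Ne.symm h5, Ne.symm h6, PySem.Dict.get?]

theorem pv_slotGet_eq (a b : Int) :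
    pvSLOT.get? (a, b) =
      (if a = 2 ∧ b = 0 then some 0 else if a = 2 ∧ b = 1 then some 1
       else if a = 2 ∧ b = 2 then some 2 else if a = 2 ∧ b = 3 then some 3
       else if a = 3 ∧ b = 0 then some 4 else if a = 3 ∧ b = 1 then some 5 else none) := by
  have h : pvSLOT = { items := [((2, 0), (0:Int)), ((2, 1), 1), ((2, 2), 2), ((2, 3), 3), ((3, 0), 4), ((3, 1), 5)] } := by decide
  rw [h]
  simp only [PySem.Dict.get?_mk_cons, beq_iff_eq, Prod.ext_iff]
  split_ifs <;> first | rfl | (exfalso; omega)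

theorem pv_keyG_eq (a b : Int) :
    pvKeyG a b =
      (if a = 2 then
        if b = 0 then some 0 else if b = 1 then some 1
        else if b = 2 then some 2 else if b = 3 then some 3 else none
      else if a = 3 then
        if b = 0 then some 4 else if b = 1 then some 5 else none
      else none) := by
  unfold pvKeyG
  rw [PySem.Dict.contains_eq_isSome_get?, pv_slotGet_eq]
  split_ifs <;> first | rfl | (exfalso; omega) | simp_all

def pvTriples : List (Int × String × String) :=
  [(0, "up", "N_UP"), (1, "down", "N_DOWN"), (2, "left", "N_LEFT"),
   (3, "right", "N_RIGHT"), (4, "cw", "N_CW"), (5, "ccw", "N_CCW")]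

-- A's action-count of key hi = B's wants-count of code c (same triple)
theorem pv_countW (acts : List String) (c : Int) (lo hi : String)
    (hp : (c, lo, hi) ∈ pvTriples) :
    acts.countP (fun s => pvKeyW s == some c)
      = acts.countP (fun s => pvKeyAct s == some hi) := by
  apply List.countP_congr
  intro s _
  rw [pv_keyW_eq, pv_keyAct_eq]
  simp only [pvTriples, List.mem_cons, List.not_mem_nil, or_false, Prod.mk.injEq] at hp
  rcases hp with ⟨rfl, rfl, rfl⟩ | ⟨rfl, rfl, rfl⟩ | ⟨rfl, rfl, rfl⟩ | ⟨rfl, rfl, rfl⟩ | ⟨rfl, rfl, rfl⟩ | ⟨rfl, rfl, rfl⟩ <;>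
    (rcases eq_or_ne s "up" with rfl | h1
     · decide
     rcases eq_or_ne s "right" with rfl | h2
     · decide
     rcases eq_or_ne s "down" with rfl | h3
     · decide
     rcases eq_or_ne s "left" with rfl | h4
     · decide
     rcases eq_or_ne s "cw" with rfl | h5
     · decide
     rcases eq_or_ne s "ccw" with rfl | h6
     · decide
     simp [h1, h2, h3, h4, h5, h6])

-- A's config-count of key hi = B's grants-count of code c (same triple)
theorem pv_countG (cfg : List (List Int)) (c : Int) (lo hi : String)
    (hp : (c, lo, hi) ∈ pvTriples) :
    cfg.countP (fun p => pvKeyG (PySem.List.pyGetD p 2 0) (PySem.List.pyGetD p 3 0) == some c)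
      = cfg.countP (fun p => pvKeyA (PySem.List.pyGetD p 2 0) (PySem.List.pyGetD p 3 0) == some hi) := by
  simp only [pvTriples, List.mem_cons, List.not_mem_nil, or_false, Prod.mk.injEq] at hp
  apply List.countP_congr
  intro p _
  generalize PySem.List.pyGetD p 2 0 = a
  generalize PySem.List.pyGetD p 3 0 = b
  rw [pv_keyG_eq]
  unfold pvKeyA
  rcases hp with ⟨rfl, rfl, rfl⟩ | ⟨rfl, rfl, rfl⟩ | ⟨rfl, rfl, rfl⟩ | ⟨rfl, rfl, rfl⟩ | ⟨rfl, rfl, rfl⟩ | ⟨rfl, rfl, rfl⟩ <;>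
    split_ifs <;> first | decide | (exfalso; omega)

theorem pv_keysA (c : List (List Int)) :
    (c.foldl (fun d part => match pvKeyA (PySem.List.pyGetD part 2 0) (PySem.List.pyGetD part 3 0) with
        | some k => d.modify k 0 (· + 1) | none => d)
      (PySem.Dict.ofList [("N_UP", (0:Int)), ("N_RIGHT", 0), ("N_DOWN", 0), ("N_LEFT", 0), ("N_CW", 0), ("N_CCW", 0)])).keys
      = ["N_UP", "N_RIGHT", "N_DOWN", "N_LEFT", "N_CW", "N_CCW"] := by
  rw [pv_keys_foldl_modifyOpt]
  · decide
  · intro x hx k hk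
    unfold pvKeyA at hk
    split_ifs at hk <;> first | exact Option.noConfusion hk | (injection hk with h; subst h; decide)

theorem pv_getDA (c : List (List Int)) (v : String) :
    (c.foldl (fun d part => match pvKeyA (PySem.List.pyGetD part 2 0) (PySem.List.pyGetD part 3 0) with
        | some k => d.modify k 0 (· + 1) | none => d)
      (PySem.Dict.ofList [("N_UP", (0:Int)), ("N_RIGHT", 0), ("N_DOWN", 0), ("N_LEFT", 0), ("N_CW", 0), ("N_CCW", 0)])).getD v 0
      = (PySem.Dict.ofList [("N_UP", (0:Int)), ("N_RIGHT", 0), ("N_DOWN", 0), ("N_LEFT", 0), ("N_CW", 0), ("N_CCW", 0)]).getD v 0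
        + (c.countP (fun p => pvKeyA (PySem.List.pyGetD p 2 0) (PySem.List.pyGetD p 3 0) == some v) : Int) :=
  pv_getD_foldl_modifyOpt (fun p => pvKeyA (PySem.List.pyGetD p 2 0) (PySem.List.pyGetD p 3 0)) c _ v

theorem pv_getDAct (acts : List String) (d : PySem.Dict String Int) (v : String) :
    (acts.foldl (fun d action => match pvKeyAct action with
        | some k => d.modify k 0 (· + 1) | none => d) d).getD v 0
      = d.getD v 0 + (acts.countP (fun s => pvKeyAct s == some v) : Int) :=
  pv_getD_foldl_modifyOpt pvKeyAct acts d v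

theorem pv_zeroA (v : String) :
    (PySem.Dict.ofList [("N_UP", (0:Int)), ("N_RIGHT", 0), ("N_DOWN", 0), ("N_LEFT", 0), ("N_CW", 0), ("N_CCW", 0)]).getD v 0 = 0 := by
  have h : (PySem.Dict.ofList [("N_UP", (0:Int)), ("N_RIGHT", 0), ("N_DOWN", 0), ("N_LEFT", 0), ("N_CW", 0), ("N_CCW", 0)])
      = { items := [("N_UP", (0:Int)), ("N_RIGHT", 0), ("N_DOWN", 0), ("N_LEFT", 0), ("N_CW", 0), ("N_CCW", 0)] } := by decide
  rw [h, PySem.Dict.getD_eq_get?_getD]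
  simp only [PySem.Dict.get?_mk_cons]
  split_ifs <;> rfl

theorem pv_zeroAlc0 (v : String) :
    ((["N_UP", "N_RIGHT", "N_DOWN", "N_LEFT", "N_CW", "N_CCW"] : List String).foldl
      (fun d k => d.insert k (0 : Int)) PySem.Dict.empty).getD v 0 = 0 := by
  have h : (["N_UP", "N_RIGHT", "N_DOWN", "N_LEFT", "N_CW", "N_CCW"] : List String).foldl
      (fun d k => d.insert k (0 : Int)) PySem.Dict.empty
      = { items := [("N_UP", (0:Int)), ("N_RIGHT", 0), ("N_DOWN", 0), ("N_LEFT", 0), ("N_CW", 0), ("N_CCW", 0)] } := by decide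
  rw [h, PySem.Dict.getD_eq_get?_getD]
  simp only [PySem.Dict.get?_mk_cons]
  split_ifs <;> rfl

-- the merge scan on two (≤)-sorted lists decides pointwise count dominance
theorem pv_covered_iff (ws gs : List Int) (hw : ws.Pairwise (· ≤ ·)) (hg : gs.Pairwise (· ≤ ·)) :
    pvCovered ws gs = true ↔ ∀ a : Int, ws.count a ≤ gs.count a := by
  induction gs generalizing ws with
  | nil =>
    cases ws with
    | nil => simp [pvCovered]
    | cons w ws' =>
      simp only [pvCovered, Bool.false_eq_true, false_iff, not_forall]
      exact ⟨w, by simp [List.count_cons_self]⟩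
  | cons g gs' ih =>
    cases ws with
    | nil => simp [pvCovered]
    | cons w ws' =>
      have hg' : gs'.Pairwise (· ≤ ·) := hg.tail
      rcases List.pairwise_cons.mp hg with ⟨hgall, _⟩
      rcases List.pairwise_cons.mp hw with ⟨hwall, hw'⟩
      by_cases hlt : g < w
      · have hstep : pvCovered (w :: ws') (g :: gs') = pvCovered (w :: ws') gs' := by
          simp [pvCovered, hlt]
        rw [hstep, ih (w :: ws') hw hg']
        constructor
        · intro h a
          have h1 := h a
          rw [List.count_cons (a := a) (b := g) (l := gs')]
          split_ifs <;> omega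
        · intro h a
          have h1 := h a
          by_cases hag : g = a
          · have hz : List.count a (w :: ws') = 0 := by
              rw [List.count_eq_zero]
              intro hmem
              rcases List.mem_cons.mp hmem with h' | h'
              · omega
              · have := hwall _ h'; omega
            rw [hz]; exact Nat.zero_le _
          · rw [List.count_cons_of_ne hag] at h1
            exact h1
      · by_cases heq : g = w
        · subst heq
          have hstep : pvCovered (g :: ws') (g :: gs') = pvCovered ws' gs' := by
            simp [pvCovered]
          rw [hstep, ih ws' hw' hg']
          constructor
          · intro h a
            have h1 := h a
            rw [List.count_cons (a := a) (b := g) (l := ws'), List.count_cons (a := a) (b := g) (l := gs')]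
            split_ifs <;> omega
          · intro h a
            have h1 := h a
            rw [List.count_cons (a := a) (b := g) (l := ws'), List.count_cons (a := a) (b := g) (l := gs')] at h1
            split_ifs at h1 <;> omega
        · have hgt : w < g := by omega
          have hstep : pvCovered (w :: ws') (g :: gs') = false := by
            simp [pvCovered, hlt, heq]
          rw [hstep]
          simp only [Bool.false_eq_true, false_iff, not_forall]
          refine ⟨w, ?_⟩
          have hz : List.count w (g :: gs') = 0 := by
            rw [List.count_eq_zero]
            intro hmem
            rcases List.mem_cons.mp hmem with h' | h'
            · omega
            · have := hgall _ h'; omega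
          rw [hz, List.count_cons_self]
          omega

-- every code B produces lies in {0,…,5}
theorem pv_keyW_range (s : String) (c : Int) (h : pvKeyW s = some c) :
    0 ≤ c ∧ c ≤ 5 := by
  rw [pv_keyW_eq] at h
  split_ifs at h <;> (injection h with h'; omega)

-- ===== VERDICT (by name: the statement is the Claim_ definition above) =====
theorem check_actions_spec : Claim_equal_check_actions := by
  intro cfg acts _ _
  show check_actions cfg acts = check_actions_alt cfg acts
  unfold check_actions check_actions_alt pvGetAllowedActions
  simp only [pv_stepA_eq, pv_stepAct_eq]
  rw [show (fun (p : List Int) =>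
        if (PySem.List.pyGetD p 2 0 = 2 ∨ PySem.List.pyGetD p 2 0 = 3)
            ∧ pvSLOT.contains (PySem.List.pyGetD p 2 0, PySem.List.pyGetD p 3 0)
        then pvSLOT.get? (PySem.List.pyGetD p 2 0, PySem.List.pyGetD p 3 0) else none)
      = fun p => pvKeyG (PySem.List.pyGetD p 2 0) (PySem.List.pyGetD p 3 0) from rfl]
  rw [show (fun (a : String) => if pvCODE.contains a then pvCODE.get? a else none)
      = fun a => pvKeyW a from rfl]
  rw [pv_keysA, Bool.eq_iff_iff]
  set wantsL := acts.filterMap pvKeyW with hwL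
  set grantsL := cfg.filterMap (fun p => pvKeyG (PySem.List.pyGetD p 2 0) (PySem.List.pyGetD p 3 0)) with hgL
  rw [pv_covered_iff _ _ (PySem.List.sorted_pairwise _ _) (PySem.List.sorted_pairwise _ _)]
  have hcw : ∀ a : Int, (PySem.List.sorted wantsL (fun x => x) false).count a = wantsL.count a :=
    fun a => (PySem.List.sorted_perm wantsL (fun x => x) false).count_eq a
  have hcg : ∀ a : Int, (PySem.List.sorted grantsL (fun x => x) false).count a = grantsL.count a :=
    fun a => (PySem.List.sorted_perm grantsL (fun x => x) false).count_eq a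
  have hwc : ∀ a : Int, wantsL.count a = acts.countP (fun s => pvKeyW s == some a) := by
    intro a; rw [hwL, List.count_filterMap]
  have hgc : ∀ a : Int, grantsL.count a
      = cfg.countP (fun p => pvKeyG (PySem.List.pyGetD p 2 0) (PySem.List.pyGetD p 3 0) == some a) := by
    intro a; rw [hgL, List.count_filterMap]
  simp only [List.all_cons, List.all_nil, Bool.and_eq_true, decide_eq_true_eq, Bool.and_true,
    ge_iff_le, pv_getDA, pv_getDAct, pv_zeroA, pv_zeroAlc0]
  constructor
  · intro h a
    rw [hcw, hcg, hwc, hgc]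
    by_cases h0 : a = 0
    · subst h0
      rw [pv_countW acts 0 "up" "N_UP" (by decide), pv_countG cfg 0 "up" "N_UP" (by decide)]
      have := h.1; omega
    by_cases h1 : a = 1
    · subst h1
      rw [pv_countW acts 1 "down" "N_DOWN" (by decide), pv_countG cfg 1 "down" "N_DOWN" (by decide)]
      have := h.2.2.1; omega
    by_cases h2 : a = 2
    · subst h2
      rw [pv_countW acts 2 "left" "N_LEFT" (by decide), pv_countG cfg 2 "left" "N_LEFT" (by decide)]
      have := h.2.2.2.1; omega
    by_cases h3 : a = 3
    · subst h3
      rw [pv_countW acts 3 "right" "N_RIGHT" (by decide), pv_countG cfg 3 "right" "N_RIGHT" (by decide)]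
      have := h.2.1; omega
    by_cases h4 : a = 4
    · subst h4
      rw [pv_countW acts 4 "cw" "N_CW" (by decide), pv_countG cfg 4 "cw" "N_CW" (by decide)]
      have := h.2.2.2.2.1; omega
    by_cases h5 : a = 5
    · subst h5
      rw [pv_countW acts 5 "ccw" "N_CCW" (by decide), pv_countG cfg 5 "ccw" "N_CCW" (by decide)]
      have := h.2.2.2.2.2; omega
    · have hz : acts.countP (fun s => pvKeyW s == some a) = 0 := by
        rw [List.countP_eq_zero]
        intro s _ hs
        rw [beq_iff_eq] at hs
        have := pv_keyW_range s a hs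
        omega
      rw [hz]; omega
  · intro h
    have h0 := h 0; have h1 := h 1; have h2 := h 2
    have h3 := h 3; have h4 := h 4; have h5 := h 5
    rw [hcw, hcg, hwc, hgc,
        pv_countW acts 0 "up" "N_UP" (by decide), pv_countG cfg 0 "up" "N_UP" (by decide)] at h0
    rw [hcw, hcg, hwc, hgc,
        pv_countW acts 1 "down" "N_DOWN" (by decide), pv_countG cfg 1 "down" "N_DOWN" (by decide)] at h1
    rw [hcw, hcg, hwc, hgc,
        pv_countW acts 2 "left" "N_LEFT" (by decide), pv_countG cfg 2 "left" "N_LEFT" (by decide)] at h2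
    rw [hcw, hcg, hwc, hgc,
        pv_countW acts 3 "right" "N_RIGHT" (by decide), pv_countG cfg 3 "right" "N_RIGHT" (by decide)] at h3
    rw [hcw, hcg, hwc, hgc,
        pv_countW acts 4 "cw" "N_CW" (by decide), pv_countG cfg 4 "cw" "N_CW" (by decide)] at h4
    rw [hcw, hcg, hwc, hgc,
        pv_countW acts 5 "ccw" "N_CCW" (by decide), pv_countG cfg 5 "ccw" "N_CCW" (by decide)] at h5
    refine ⟨by omega, by omega, by omega, by omega, by omega, by omega⟩
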